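-- pv_equiv track=rewrite | github.com/frankRenlf/python_practice | clrs/leetcode/LCP41.py | flipChess
-- ===== SOURCE A (Python) =====
-- from collections import deque
-- from typing import List
--
-- def flipChess(chessboard: List[str]) -> int:
--     def judge(board: List[List[str]], x: int, y: int, dx: int, dy: int) -> bool:
--         x += dx
--         y += dy
--         while 0 <= x < len(board) and 0 <= y < len(board[0]):
--             if board[x][y] == "X":
--                 return True
--             elif board[x][y] == ".":
--                 return False
--             x += dx
--             y += dy
--         return False
--
--     def bfs(board: List[str], px: int, py: int) -> int:
--         board = [list(row) for row in board]
--         cnt = 0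
--         q = deque([(px, py)])
--         board[px][py] = "X"
--
--         while q:
--             tx, ty = q.popleft()
--             for dx in [-1, 0, 1]:
--                 for dy in [-1, 0, 1]:
--                     if dx == dy == 0:
--                         continue
--                     if judge(board, tx, ty, dx, dy):
--                         x, y = tx + dx, ty + dy
--                         while board[x][y] != "X":
--                             q.append((x, y))
--                             board[x][y] = "X"
--                             x += dx
--                             y += dy
--                             cnt += 1
--         return cnt
--
--     res = 0
--     for i in range(len(chessboard)):
--         for j in range(len(chessboard[0])):
--             if chessboard[i][j] == ".":
--                 res = max(res, bfs(chessboard, i, j))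
--     return res
-- ===== SOURCE B (Python) =====
-- def flipChess(chessboard):
--     R, C = len(chessboard), len(chessboard[0])
--     DIRS = [(-1, -1), (-1, 0), (-1, 1), (0, -1), (0, 1), (1, -1), (1, 0), (1, 1)]
--
--     def ray(S, x, y, dx, dy):
--         # cells captured from (x, y) towards (dx, dy) given flipped-set S, else []
--         seg = []
--         x += dx
--         y += dy
--         while 0 <= x < R and 0 <= y < C and (x, y) not in S and chessboard[x][y] not in "X.":
--             seg.append((x, y))
--             x += dx
--             y += dy
--         if 0 <= x < R and 0 <= y < C and ((x, y) in S or chessboard[x][y] == "X"):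
--             return seg
--         return []
--
--     def captures(S):
--         new = set()
--         for (x, y) in S:
--             for dx, dy in DIRS:
--                 new.update(ray(S, x, y, dx, dy))
--         return new
--
--     best = 0
--     for i in range(R):
--         for j in range(C):
--             if chessboard[i][j] == ".":
--                 S = {(i, j)}
--                 for _ in range(R * C):
--                     new = captures(S)
--                     if not new:
--                         break
--                     S |= new
--                 best = max(best, len(S) - 1)
--     return best
-- ===== Notes on version B (the rewrite author's own statement) =====
-- stated objective: alternative
-- what changed: The cascade is computed without any queue or board mutation: instead of A's BFS (pop a flipped cell, judge-walk then mutate-and-count-walk per direction, push flipped cells), B iterates a synchronous fixed point -- each round it recomputes the set of all cells capturable from the whole current flipped set on the immutable board and unions them in, stopping when a round adds nothing (at most R*C rounds); the answer is len(S)-1; the two agree because both compute the least capture-closed set containing the placed cell (order-independence of the flood fill, proved in Lean).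
-- outside the precondition, e.g. on flipChess([]): A returns 0, B raises IndexError
import Mathlib
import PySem

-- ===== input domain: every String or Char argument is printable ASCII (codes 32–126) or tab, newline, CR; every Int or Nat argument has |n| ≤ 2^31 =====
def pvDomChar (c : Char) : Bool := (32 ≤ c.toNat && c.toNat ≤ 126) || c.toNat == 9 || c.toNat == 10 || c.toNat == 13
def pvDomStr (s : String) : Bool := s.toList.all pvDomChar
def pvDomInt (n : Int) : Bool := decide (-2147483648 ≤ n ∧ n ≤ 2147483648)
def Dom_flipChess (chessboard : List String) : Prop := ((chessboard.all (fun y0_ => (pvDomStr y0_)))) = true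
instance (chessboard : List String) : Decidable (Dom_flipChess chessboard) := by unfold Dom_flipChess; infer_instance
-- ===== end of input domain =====

-- B replaces A's mutable-board BFS cascade (deque of flipped cells, judge walk then
-- mutate-and-count walk per direction) with a queue-free synchronous fixed-point iteration on
-- the immutable board: each round recomputes every capturable cell from the whole current
-- flipped set and unions it in, until a round adds nothing; the answer is len(S)-1. The two
-- agree because both compute the least capture-closed set containing the placed cell (the
-- flood fill is order-independent), which is what the proof below establishes.
-- Neither version mutates its argument.

-- ===== PORT A =====

-- board[x][y] after the bounds check (indices are nonnegative there)
def pvCell (b : List (List Char)) (x y : Int) : Char :=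
  (b.getD x.toNat []).getD y.toNat '?'

-- board[x][y] = "X"
def pvSet (b : List (List Char)) (x y : Int) : List (List Char) :=
  b.modify x.toNat (fun row => row.set y.toNat 'X')

-- judge's while loop (fuel bounds the walk; R+C+2 steps always suffice to leave the board)
def pvJudge (b : List (List Char)) (R C dx dy : Int) : Int → Int → Nat → Bool
  | _, _, 0 => false
  | x, y, f+1 =>
    if 0 ≤ x ∧ x < R ∧ 0 ≤ y ∧ y < C then
      if pvCell b x y = 'X' then true
      else if pvCell b x y = '.' then false
      else pvJudge b R C dx dy (x+dx) (y+dy) f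
    else false

-- the inner "while board[x][y] != 'X'" flip walk: appends to q, writes 'X', counts
def pvFlipA (dx dy : Int) :
    List (List Char) → Int → Int → List (Int × Int) → Int → Nat →
    List (List Char) × List (Int × Int) × Int
  | b, _, _, q, cnt, 0 => (b, q, cnt)
  | b, x, y, q, cnt, f+1 =>
    if pvCell b x y ≠ 'X' then
      pvFlipA dx dy (pvSet b x y) (x+dx) (y+dy) (q ++ [(x, y)]) (cnt + 1) f
    else (b, q, cnt)

-- one (dx,dy) body, including the "if dx == dy == 0: continue" guard
def pvDirA (R C : Int) (fr : Nat) (t : Int × Int)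
    (st : List (List Char) × List (Int × Int) × Int) (d : Int × Int) :
    List (List Char) × List (Int × Int) × Int :=
  if d.1 = 0 ∧ d.2 = 0 then st
  else
    if pvJudge st.1 R C d.1 d.2 (t.1 + d.1) (t.2 + d.2) fr then
      pvFlipA d.1 d.2 st.1 (t.1 + d.1) (t.2 + d.2) st.2.1 st.2.2 fr
    else st

-- the nested "for dx in [-1,0,1]: for dy in [-1,0,1]:" loops
def pvStepA (R C : Int) (fr : Nat) (t : Int × Int)
    (st : List (List Char) × List (Int × Int) × Int) :
    List (List Char) × List (Int × Int) × Int :=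
  [(-1 : Int), 0, 1].foldl
    (fun st dx => [(-1 : Int), 0, 1].foldl (fun st dy => pvDirA R C fr t st (dx, dy)) st) st

-- the "while q:" loop (fuel: R*C+2 pops always suffice — every queued cell was flipped once)
def pvLoopA (R C : Int) (fr : Nat) :
    List (List Char) × List (Int × Int) × Int → Nat → Int
  | (_, _, cnt), 0 => cnt
  | (_, [], cnt), _+1 => cnt
  | (b, t :: rest, cnt), f+1 => pvLoopA R C fr (pvStepA R C fr t (b, rest, cnt)) f

def pvBfsA (chessboard : List String) (px py : Int) : Int :=
  let b0 := chessboard.map (fun s => s.toList)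
  let R : Int := b0.length
  let C : Int := (b0.getD 0 []).length
  pvLoopA R C (R.toNat + C.toNat + 2) (pvSet b0 px py, [(px, py)], 0) (R.toNat * C.toNat + 2)

def flipChess (chessboard : List String) : Int :=
  let b0 := chessboard.map (fun s => s.toList)
  (List.range b0.length).foldl (fun res i =>
    (List.range (b0.getD 0 []).length).foldl (fun res j =>
      if pvCell b0 (i : Int) (j : Int) = '.' then max res (pvBfsA chessboard i j) else res) res) 0

-- ===== PORT B =====

-- chessboard[x][y] read straight off the immutable input (after a bounds check)
def pvCellB (board0 : List String) (x y : Int) : Char :=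
  (board0.getD x.toNat "").toList.getD y.toNat '?'

def pvDirsB : List (Int × Int) :=
  [(-1, -1), (-1, 0), (-1, 1), (0, -1), (0, 1), (1, -1), (1, 0), (1, 1)]

-- B's ray(S, x, y, dx, dy): the cells captured from one cell in one direction, none = open ray
-- (the Python returns [] there; the port's caller turns none into [] with getD)
def pvRayB (board0 : List String) (fl : PySem.Set (Int × Int)) (R C dx dy : Int) :
    Int → Int → Nat → Option (List (Int × Int))
  | _, _, 0 => none
  | x, y, f+1 =>
    if 0 ≤ x ∧ x < R ∧ 0 ≤ y ∧ y < C then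
      if (x, y) ∈ fl ∨ pvCellB board0 x y = 'X' then some []
      else if pvCellB board0 x y = '.' then none
      else
        match pvRayB board0 fl R C dx dy (x+dx) (y+dy) f with
        | some seg => some ((x, y) :: seg)
        | none => none
    else none

-- B's captures(S): every cell capturable from the whole current set, one round
def pvCapturesB (board0 : List String) (R C : Int) (fr : Nat)
    (S : PySem.Set (Int × Int)) : PySem.Set (Int × Int) :=
  S.foldl (fun nw c =>
    pvDirsB.foldl (fun nw d =>
      ((pvRayB board0 S R C d.1 d.2 (c.1 + d.1) (c.2 + d.2) fr).getD []).foldl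
        PySem.Set.add nw) nw) PySem.Set.empty

-- B's "for _ in range(R*C): new = captures(S); if not new: break; S |= new"
def pvIterB (board0 : List String) (R C : Int) (fr : Nat) :
    PySem.Set (Int × Int) → Nat → PySem.Set (Int × Int)
  | S, 0 => S
  | S, n+1 =>
    let nw := pvCapturesB board0 R C fr S
    if nw = [] then S else pvIterB board0 R C fr (PySem.Set.union S nw) n

def flipChess_alt (chessboard : List String) : Int :=
  let R := chessboard.length
  let C := (chessboard.headD "").toList.length
  (List.range R).foldl (fun best i =>
    (List.range C).foldl (fun best j =>
      if pvCellB chessboard (i : Int) (j : Int) = '.'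
      then max best
        ((PySem.Set.len (pvIterB chessboard (R : Int) (C : Int) (R + C + 2)
          (PySem.Set.add PySem.Set.empty ((i : Int), (j : Int))) (R * C))) - 1)
      else best) best) 0

-- ===== PRECONDITION & SPEC =====
-- Pre_ excludes the inputs where an IndexError is raised on chessboard[0] or on a row shorter
-- than row 0: on ragged-short boards A itself raises; on the empty board A's dead outer loop
-- never touches chessboard[0] and it returns 0, while B evaluates len(chessboard[0]) up front
-- and raises there, so [] is excluded too.
def Pre_flipChess (chessboard : List String) : Prop :=
  chessboard ≠ [] ∧ ∀ s ∈ chessboard, (chessboard.headD "").toList.length ≤ s.toList.length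
instance (chessboard : List String) : Decidable (Pre_flipChess chessboard) := by
  unfold Pre_flipChess; infer_instance

def pvWitness_flipChess : List String := ["OX.", ".O."]

def Spec_flipChess (chessboard : List String) (out : Int) : Prop := out = flipChess_alt chessboard
instance (chessboard : List String) (out : Int) : Decidable (Spec_flipChess chessboard out) := by
  unfold Spec_flipChess; infer_instance

-- ===== CLAIM (what is proved, stated in full; the proofs are below) =====
def Claim_equal_flipChess : Prop := ∀ (chessboard : List String), Dom_flipChess chessboard → Pre_flipChess chessboard → Spec_flipChess chessboard (flipChess chessboard)

-- ===== LEMMAS AND PROOFS =====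

-- The proof goes through an intermediate clean worklist form of A's BFS (pvLoopB below,
-- tracking the flipped set and an order list instead of the mutated board), then shows that
-- both that worklist and B's fixed-point iteration compute the least capture-closed set
-- containing the placed cell.

-- ---- the clean worklist form of A's BFS ----

def pvDirB (board0 : List String) (R C : Int) (fr : Nat) (t : Int × Int)
    (st : PySem.Set (Int × Int) × List (Int × Int)) (d : Int × Int) :
    PySem.Set (Int × Int) × List (Int × Int) :=
  match pvRayB board0 st.1 R C d.1 d.2 (t.1 + d.1) (t.2 + d.2) fr with
  | some seg =>
    if seg.isEmpty then st
    else seg.foldl (fun p c => (PySem.Set.add p.1 c, p.2 ++ [c])) st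
  | none => st

def pvStepB (board0 : List String) (R C : Int) (fr : Nat) (t : Int × Int)
    (st : PySem.Set (Int × Int) × List (Int × Int)) :
    PySem.Set (Int × Int) × List (Int × Int) :=
  pvDirsB.foldl (pvDirB board0 R C fr t) st

def pvLoopB (board0 : List String) (R C : Int) (fr : Nat) :
    PySem.Set (Int × Int) → List (Int × Int) → Nat → Nat → Int
  | _, order, _, 0 => (order.length : Int) - 1
  | fl, order, k, f+1 =>
    match order[k]? with
    | none => (order.length : Int) - 1
    | some t =>
      let st := pvStepB board0 R C fr t (fl, order)
      pvLoopB board0 R C fr st.1 st.2 (k+1) f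

def pvCascadeB (board0 : List String) (R C : Int) (fr fq : Nat) (pi pj : Int) : Int :=
  pvLoopB board0 R C fr (PySem.Set.add PySem.Set.empty (pi, pj)) [(pi, pj)] 0 fq

-- ---- basic cell/update lemmas (A side) ----

theorem pv_length_pvSet (b : List (List Char)) (x y : Int) : (pvSet b x y).length = b.length := by
  simp [pvSet]

theorem pv_rowlen_pvSet (b : List (List Char)) (x y : Int) (i : Nat) :
    ((pvSet b x y).getD i []).length = (b.getD i []).length := by
  simp only [pvSet, List.getD, List.getElem?_modify]
  cases b[i]? with
  | none => simp
  | some row => by_cases h : x.toNat = i <;> simp [h]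

theorem pvCell_pvSet_self (b : List (List Char)) (x y : Int)
    (hxl : x.toNat < b.length) (hyl : y.toNat < (b.getD x.toNat []).length) :
    pvCell (pvSet b x y) x y = 'X' := by
  simp only [pvCell, pvSet, List.getD, List.getElem?_modify]
  cases hb : b[x.toNat]? with
  | none => exact absurd (List.getElem?_eq_none_iff.mp hb) (by omega)
  | some row =>
    have hrl : y.toNat < row.length := by
      have : b.getD x.toNat [] = row := by simp [List.getD, hb]
      rw [this] at hyl; exact hyl
    simp [hrl]

theorem pvCell_pvSet_ne (b : List (List Char)) (x y x' y' : Int)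
    (hx : 0 ≤ x) (hy : 0 ≤ y) (hx' : 0 ≤ x') (hy' : 0 ≤ y')
    (hne : ¬(x' = x ∧ y' = y)) :
    pvCell (pvSet b x y) x' y' = pvCell b x' y' := by
  simp only [pvCell, pvSet, List.getD, List.getElem?_modify]
  cases hb : b[x'.toNat]? with
  | none => simp
  | some row =>
    by_cases hxx : x.toNat = x'.toNat
    · have hyne : y'.toNat ≠ y.toNat := by omega
      simp [hxx, Ne.symm hyne]
    · simp [hxx]

-- ---- the simulation relation between A's mutated board and the worklist's flipped set ----

def pvGood (board0 : List String) (C : Int) (b : List (List Char)) (fl : PySem.Set (Int × Int)) : Prop :=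
  b.length = board0.length ∧
  (∀ i : Nat, (b.getD i []).length = (board0.getD i "").toList.length) ∧
  (∀ x y : Int, 0 ≤ x → x < (board0.length : Int) → 0 ≤ y → y < C →
    ((x, y) ∈ fl → pvCell b x y = 'X') ∧ ((x, y) ∉ fl → pvCell b x y = pvCellB board0 x y))

theorem pvGood_add (board0 : List String) (C : Int) (b : List (List Char))
    (fl : PySem.Set (Int × Int)) (x y : Int)
    (hC : ∀ i : Nat, i < board0.length → C ≤ ((board0.getD i "").toList.length : Int))
    (hG : pvGood board0 C b fl)
    (hx : 0 ≤ x) (hxR : x < (board0.length : Int)) (hy : 0 ≤ y) (hyC : y < C) :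
    pvGood board0 C (pvSet b x y) (PySem.Set.add fl (x, y)) := by
  obtain ⟨hlen, hrow, hcell⟩ := hG
  have hxl : x.toNat < b.length := by omega
  have hyl : y.toNat < (b.getD x.toNat []).length := by
    have h1 := hrow x.toNat
    have h2 := hC x.toNat (by omega)
    omega
  refine ⟨by rw [pv_length_pvSet]; exact hlen, fun i => by rw [pv_rowlen_pvSet]; exact hrow i, ?_⟩
  intro x' y' hx' hxR' hy' hyC'
  constructor
  · intro hmem
    rcases (PySem.Set.mem_add fl (x, y) (x', y')).mp hmem with h | h
    · by_cases heq : x' = x ∧ y' = y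
      · obtain ⟨h1, h2⟩ := heq; subst h1; subst h2
        exact pvCell_pvSet_self b x' y' hxl hyl
      · rw [pvCell_pvSet_ne b x y x' y' hx hy hx' hy' heq]
        exact (hcell x' y' hx' hxR' hy' hyC').1 h
    · obtain ⟨h1, h2⟩ := Prod.mk.injEq .. ▸ h
      subst h1; subst h2
      exact pvCell_pvSet_self b x' y' hxl hyl
  · intro hmem
    have hnm : (x', y') ∉ fl := fun h => hmem ((PySem.Set.mem_add fl (x, y) (x', y')).mpr (Or.inl h))
    have hne : ¬(x' = x ∧ y' = y) := by
      rintro ⟨h1, h2⟩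
      exact hmem ((PySem.Set.mem_add fl (x, y) (x', y')).mpr (Or.inr (by rw [h1, h2])))
    rw [pvCell_pvSet_ne b x y x' y' hx hy hx' hy' hne]
    exact (hcell x' y' hx' hxR' hy' hyC').2 hnm

-- ---- A's two ray walks vs the single scan ----

theorem pvJudge_eq_isSome_pvRayB (board0 : List String) (C : Int) (b : List (List Char))
    (fl : PySem.Set (Int × Int)) (dx dy : Int) (hG : pvGood board0 C b fl) :
    ∀ (f : Nat) (x y : Int),
      pvJudge b (board0.length : Int) C dx dy x y f =
      (pvRayB board0 fl (board0.length : Int) C dx dy x y f).isSome := by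
  intro f
  induction f with
  | zero => intro x y; simp [pvJudge, pvRayB]
  | succ f ih =>
    intro x y
    simp only [pvJudge, pvRayB]
    by_cases hb : 0 ≤ x ∧ x < (board0.length : Int) ∧ 0 ≤ y ∧ y < C
    · obtain ⟨hx, hxR, hy, hyC⟩ := hb
      have hcell := (hG.2.2) x y hx hxR hy hyC
      by_cases hm : (x, y) ∈ fl
      · simp [hx, hxR, hy, hyC, hcell.1 hm, hm]
      · rw [hcell.2 hm]
        by_cases hX : pvCellB board0 x y = 'X'
        · simp [hx, hxR, hy, hyC, hX]
        · by_cases hD : pvCellB board0 x y = '.'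
          · simp [hx, hxR, hy, hyC, hD, hm]
          · simp only [if_pos (by omega : 0 ≤ x ∧ x < (board0.length : Int) ∧ 0 ≤ y ∧ y < C),
              if_neg hX, if_neg hD, if_neg (show ¬((x, y) ∈ fl ∨ pvCellB board0 x y = 'X') from
                fun h => h.elim hm hX), ih (x + dx) (y + dy)]
            cases pvRayB board0 fl (board0.length : Int) C dx dy (x + dx) (y + dy) f <;> rfl
    · rw [if_neg hb, if_neg hb]; rfl

theorem pvRayB_add_off (board0 : List String) (fl : PySem.Set (Int × Int))
    (R C dx dy : Int) (a : Int × Int) :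
    ∀ (f : Nat) (x y : Int), (∀ k : Nat, ¬(x + k * dx = a.1 ∧ y + k * dy = a.2)) →
      pvRayB board0 (PySem.Set.add fl a) R C dx dy x y f =
      pvRayB board0 fl R C dx dy x y f := by
  intro f
  induction f with
  | zero => intro x y _; rfl
  | succ f ih =>
    intro x y hoff
    have hxy : (x, y) ≠ a := by
      have h0 := hoff 0
      intro h; rw [← h] at h0; simp at h0
    have hmem : ((x, y) ∈ PySem.Set.add fl a) ↔ (x, y) ∈ fl := by
      rw [PySem.Set.mem_add]
      exact ⟨fun h => h.elim id (fun h => absurd h hxy), Or.inl⟩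
    have hshift : ∀ k : Nat, ¬(x + dx + k * dx = a.1 ∧ y + dy + k * dy = a.2) := by
      intro k
      have := hoff (k + 1)
      intro ⟨h1, h2⟩
      exact this ⟨by push_cast; linarith, by push_cast; linarith⟩
    simp only [pvRayB]
    by_cases hb : 0 ≤ x ∧ x < R ∧ 0 ≤ y ∧ y < C
    · rw [if_pos hb, if_pos hb]
      by_cases hhit : (x, y) ∈ fl ∨ pvCellB board0 x y = 'X'
      · rw [if_pos (by rw [hmem]; exact hhit), if_pos hhit]
      · rw [if_neg (by rw [hmem]; exact hhit), if_neg hhit]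
        by_cases hD : pvCellB board0 x y = '.'
        · rw [if_pos hD, if_pos hD]
        · rw [if_neg hD, if_neg hD, ih (x + dx) (y + dy) hshift]
    · rw [if_neg hb, if_neg hb]

theorem pvFlipA_of_ray (board0 : List String) (C dx dy : Int)
    (hd : ¬(dx = 0 ∧ dy = 0))
    (hC : ∀ i : Nat, i < board0.length → C ≤ ((board0.getD i "").toList.length : Int)) :
    ∀ (f : Nat) (b : List (List Char)) (fl : PySem.Set (Int × Int)) (x y : Int)
      (seg q : List (Int × Int)) (cnt : Int),
      pvGood board0 C b fl →
      pvRayB board0 fl (board0.length : Int) C dx dy x y f = some seg →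
      ∃ b', pvFlipA dx dy b x y q cnt f = (b', q ++ seg, cnt + (seg.length : Int)) ∧
            pvGood board0 C b' (seg.foldl PySem.Set.add fl) := by
  intro f
  induction f with
  | zero => intro b fl x y seg q cnt _ hray; exact absurd hray (by simp [pvRayB])
  | succ f ih =>
    intro b fl x y seg q cnt hG hray
    simp only [pvRayB] at hray
    by_cases hb : 0 ≤ x ∧ x < (board0.length : Int) ∧ 0 ≤ y ∧ y < C
    · rw [if_pos hb] at hray
      obtain ⟨hx, hxR, hy, hyC⟩ := hb
      have hcell := (hG.2.2) x y hx hxR hy hyC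
      by_cases hhit : (x, y) ∈ fl ∨ pvCellB board0 x y = 'X'
      · rw [if_pos hhit] at hray
        obtain rfl : ([] : List (Int × Int)) = seg := Option.some.injEq .. ▸ hray
        have hcX : pvCell b x y = 'X' := by
          rcases hhit with hm | hX
          · exact hcell.1 hm
          · by_cases hm : (x, y) ∈ fl
            · exact hcell.1 hm
            · rw [hcell.2 hm]; exact hX
        refine ⟨b, ?_, by simpa using hG⟩
        simp [pvFlipA, hcX]
      · rw [if_neg hhit] at hray
        have hm : (x, y) ∉ fl := fun h => hhit (Or.inl h)
        have hX : pvCellB board0 x y ≠ 'X' := fun h => hhit (Or.inr h)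
        by_cases hD : pvCellB board0 x y = '.'
        · rw [if_pos hD] at hray; exact absurd hray (by simp)
        · rw [if_neg hD] at hray
          cases hray' : pvRayB board0 fl (board0.length : Int) C dx dy (x + dx) (y + dy) f with
          | none => rw [hray'] at hray; exact absurd hray (by simp)
          | some seg' =>
            rw [hray'] at hray
            obtain rfl : (x, y) :: seg' = seg := Option.some.injEq .. ▸ hray
            have hcne : pvCell b x y ≠ 'X' := by rw [hcell.2 hm]; exact hX
            have hGood' : pvGood board0 C (pvSet b x y) (PySem.Set.add fl (x, y)) :=
              pvGood_add board0 C b fl x y hC hG hx hxR hy hyC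
            have hoff : ∀ k : Nat, ¬(x + dx + (k : Int) * dx = x ∧ y + dy + (k : Int) * dy = y) := by
              intro k ⟨h1, h2⟩
              rcases not_and_or.mp hd with h | h
              · have h1' : (1 + (k : Int)) * dx = 0 := by ring_nf; linarith
                rcases mul_eq_zero.mp h1' with h0 | h0
                · have : (0 : Int) ≤ (k : Int) := Int.natCast_nonneg k
                  omega
                · exact h h0
              · have h2' : (1 + (k : Int)) * dy = 0 := by ring_nf; linarith
                rcases mul_eq_zero.mp h2' with h0 | h0
                · have : (0 : Int) ≤ (k : Int) := Int.natCast_nonneg k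
                  omega
                · exact h h0
            have hray'' : pvRayB board0 (PySem.Set.add fl (x, y)) (board0.length : Int) C dx dy
                (x + dx) (y + dy) f = some seg' := by
              rw [pvRayB_add_off board0 fl (board0.length : Int) C dx dy (x, y) f
                (x + dx) (y + dy) hoff]
              exact hray'
            obtain ⟨b', hfe, hG'⟩ := ih (pvSet b x y) (PySem.Set.add fl (x, y)) (x + dx) (y + dy)
              seg' (q ++ [(x, y)]) (cnt + 1) hGood' hray''
            refine ⟨b', ?_, by simpa [List.foldl_cons] using hG'⟩
            simp only [pvFlipA, if_pos hcne, hfe]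
            have h1 : q ++ [(x, y)] ++ seg' = q ++ (x, y) :: seg' := by simp
            have h2 : cnt + 1 + (seg'.length : Int) = cnt + (((x, y) :: seg').length : Int) := by
              simp only [List.length_cons]; push_cast; ring
            rw [h1, h2]
    · rw [if_neg hb] at hray; exact absurd hray (by simp)

-- ---- one direction, one popped cell, the whole queue loop (A board vs worklist) ----

def pvInv (board0 : List String) (C : Int)
    (stA : List (List Char) × List (Int × Int) × Int)
    (stB : PySem.Set (Int × Int) × List (Int × Int)) (k : Nat) : Prop :=
  pvGood board0 C stA.1 stB.1 ∧ stA.2.1 = stB.2.drop k ∧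
  stA.2.2 + 1 = (stB.2.length : Int) ∧ k ≤ stB.2.length

theorem pv_foldl_pair (seg : List (Int × Int)) :
    ∀ (fl : PySem.Set (Int × Int)) (order : List (Int × Int)),
      seg.foldl (fun p c => (PySem.Set.add p.1 c, p.2 ++ [c])) (fl, order) =
      (seg.foldl PySem.Set.add fl, order ++ seg) := by
  induction seg with
  | nil => intro fl order; simp
  | cons c rest ih => intro fl order; simp [List.foldl_cons, ih]

theorem pvDir_sim (board0 : List String) (C : Int) (fr : Nat) (t d : Int × Int)
    (hd : ¬(d.1 = 0 ∧ d.2 = 0))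
    (hC : ∀ i : Nat, i < board0.length → C ≤ ((board0.getD i "").toList.length : Int))
    (stA : List (List Char) × List (Int × Int) × Int)
    (stB : PySem.Set (Int × Int) × List (Int × Int)) (k : Nat)
    (hI : pvInv board0 C stA stB k) :
    pvInv board0 C (pvDirA (board0.length : Int) C fr t stA d)
      (pvDirB board0 (board0.length : Int) C fr t stB d) k := by
  obtain ⟨b, q, cnt⟩ := stA
  obtain ⟨fl, order⟩ := stB
  obtain ⟨hG, hq, hcnt, hk⟩ := hI
  dsimp only at hG hq hcnt hk
  simp only [pvDirA, pvDirB, if_neg hd]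
  rw [pvJudge_eq_isSome_pvRayB board0 C b fl d.1 d.2 hG fr (t.1 + d.1) (t.2 + d.2)]
  cases hray : pvRayB board0 fl (board0.length : Int) C d.1 d.2 (t.1 + d.1) (t.2 + d.2) fr with
  | none => exact ⟨hG, hq, hcnt, hk⟩
  | some seg =>
    obtain ⟨b', hfe, hG'⟩ := pvFlipA_of_ray board0 C d.1 d.2 hd hC fr b fl
      (t.1 + d.1) (t.2 + d.2) seg q cnt hG hray
    simp only [Option.isSome_some, if_true, hfe]
    by_cases hseg : seg.isEmpty
    · rw [if_pos hseg]
      have hnil : seg = [] := List.isEmpty_iff.mp hseg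
      subst hnil
      exact ⟨by simpa using hG', by simpa using hq, by simpa using hcnt, hk⟩
    · rw [if_neg hseg, pv_foldl_pair]
      refine ⟨hG', ?_, ?_, ?_⟩
      · dsimp only
        rw [hq, List.drop_append_of_le_length hk]
      · dsimp only
        simp only [List.length_append]
        push_cast
        omega
      · dsimp only
        simp only [List.length_append]
        omega

theorem pvDirA_zero (R C : Int) (fr : Nat) (t : Int × Int)
    (st : List (List Char) × List (Int × Int) × Int) :
    pvDirA R C fr t st (0, 0) = st := by
  simp [pvDirA]

theorem pvStepA_eq_dirs (R C : Int) (fr : Nat) (t : Int × Int)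
    (st : List (List Char) × List (Int × Int) × Int) :
    pvStepA R C fr t st = pvDirsB.foldl (pvDirA R C fr t) st := by
  simp only [pvStepA, pvDirsB, List.foldl_cons, List.foldl_nil, pvDirA_zero]

theorem pvFold_sim (board0 : List String) (C : Int) (fr : Nat) (t : Int × Int)
    (hC : ∀ i : Nat, i < board0.length → C ≤ ((board0.getD i "").toList.length : Int))
    (k : Nat) :
    ∀ (ds : List (Int × Int)), (∀ d ∈ ds, ¬(d.1 = 0 ∧ d.2 = 0)) →
    ∀ stA stB, pvInv board0 C stA stB k →
      pvInv board0 C (ds.foldl (pvDirA (board0.length : Int) C fr t) stA)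
        (ds.foldl (pvDirB board0 (board0.length : Int) C fr t) stB) k := by
  intro ds
  induction ds with
  | nil => intro _ stA stB hI; exact hI
  | cons d rest ih =>
    intro hds stA stB hI
    simp only [List.foldl_cons]
    exact ih (fun d' hdm => hds d' (List.mem_cons_of_mem _ hdm)) _ _
      (pvDir_sim board0 C fr t d (hds d (List.mem_cons_self ..)) hC stA stB k hI)

theorem pvStep_sim (board0 : List String) (C : Int) (fr : Nat) (t : Int × Int)
    (hC : ∀ i : Nat, i < board0.length → C ≤ ((board0.getD i "").toList.length : Int))
    (stA : List (List Char) × List (Int × Int) × Int)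
    (stB : PySem.Set (Int × Int) × List (Int × Int)) (k : Nat)
    (hI : pvInv board0 C stA stB k) :
    pvInv board0 C (pvStepA (board0.length : Int) C fr t stA)
      (pvStepB board0 (board0.length : Int) C fr t stB) k := by
  rw [pvStepA_eq_dirs]
  exact pvFold_sim board0 C fr t hC k pvDirsB (by decide) stA stB hI

theorem pvLoop_sim (board0 : List String) (C : Int) (fr : Nat)
    (hC : ∀ i : Nat, i < board0.length → C ≤ ((board0.getD i "").toList.length : Int)) :
    ∀ (f : Nat) (stA : List (List Char) × List (Int × Int) × Int)
      (fl : PySem.Set (Int × Int)) (order : List (Int × Int)) (k : Nat),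
      pvInv board0 C stA (fl, order) k →
      pvLoopA (board0.length : Int) C fr stA f = pvLoopB board0 (board0.length : Int) C fr fl order k f := by
  intro f
  induction f with
  | zero =>
    intro stA fl order k hI
    obtain ⟨b, q, cnt⟩ := stA
    obtain ⟨_, _, hcnt, _⟩ := hI
    dsimp only at hcnt
    simp only [pvLoopA, pvLoopB]
    omega
  | succ f ih =>
    intro stA fl order k hI
    obtain ⟨b, q, cnt⟩ := stA
    obtain ⟨hG, hq, hcnt, hk⟩ := hI
    dsimp only at hG hq hcnt hk
    cases hget : order[k]? with
    | none =>
      have hlen : order.length ≤ k := List.getElem?_eq_none_iff.mp hget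
      have hqnil : q = [] := by rw [hq, List.drop_eq_nil_iff]; omega
      subst hqnil
      simp only [pvLoopA, pvLoopB, hget]
      omega
    | some t =>
      have hklt : k < order.length := by
        rcases Nat.lt_or_ge k order.length with h | h
        · exact h
        · rw [List.getElem?_eq_none_iff.mpr h] at hget; cases hget
      have hqc : q = t :: order.drop (k + 1) := by
        rw [hq, ← List.getElem_cons_drop hklt]
        congr 1
        have := List.getElem?_eq_getElem hklt
        rw [this] at hget
        exact Option.some_inj.mp hget
      subst hqc
      simp only [pvLoopA, pvLoopB, hget]
      have hI' : pvInv board0 C (b, order.drop (k + 1), cnt) (fl, order) (k + 1) :=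
        ⟨hG, rfl, hcnt, by dsimp only; omega⟩
      have hstep := pvStep_sim board0 C fr t hC (b, order.drop (k + 1), cnt) (fl, order) (k + 1) hI'
      have := ih (pvStepA (board0.length : Int) C fr t (b, order.drop (k + 1), cnt))
        (pvStepB board0 (board0.length : Int) C fr t (fl, order)).1
        (pvStepB board0 (board0.length : Int) C fr t (fl, order)).2 (k + 1) (by
          simpa using hstep)
      exact this

-- ---- bridges between A's copied board and the original strings ----

theorem pv_row0_map (chessboard : List String) :
    ((chessboard.map (fun s => s.toList)).getD 0 []).length = (chessboard.headD "").toList.length := by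
  cases chessboard <;> simp [List.getD]

theorem pv_rowlen_map (chessboard : List String) (i : Nat) :
    ((chessboard.map (fun s => s.toList)).getD i []).length = (chessboard.getD i "").toList.length := by
  simp only [List.getD, List.getElem?_map]
  cases chessboard[i]? <;> simp

theorem pvCell_map (chessboard : List String) (x y : Int) :
    pvCell (chessboard.map (fun s => s.toList)) x y = pvCellB chessboard x y := by
  simp only [pvCell, pvCellB, List.getD, List.getElem?_map]
  cases chessboard[x.toNat]? <;> simp

theorem pvBfs_eq (chessboard : List String) (hpre : Pre_flipChess chessboard) (pi pj : Nat)
    (hi : pi < chessboard.length) (hj : pj < (chessboard.headD "").toList.length) :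
    pvBfsA chessboard (pi : Int) (pj : Int) =
      pvCascadeB chessboard (chessboard.length : Int) ((chessboard.headD "").toList.length : Int)
        (chessboard.length + (chessboard.headD "").toList.length + 2)
        (chessboard.length * (chessboard.headD "").toList.length + 2) (pi : Int) (pj : Int) := by
  have hC : ∀ i : Nat, i < chessboard.length →
      ((chessboard.headD "").toList.length : Int) ≤ ((chessboard.getD i "").toList.length : Int) := by
    intro i hilen
    have hmem : chessboard.getD i "" ∈ chessboard := by
      rw [List.getD, List.getElem?_eq_getElem hilen]
      exact List.getElem_mem hilen
    exact_mod_cast hpre.2 _ hmem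
  set C : Int := ((chessboard.headD "").toList.length : Int) with hCdef
  set b0 : List (List Char) := chessboard.map (fun s => s.toList) with hb0
  have hGood : pvGood chessboard C (pvSet b0 (pi : Int) (pj : Int))
      (PySem.Set.add PySem.Set.empty ((pi : Int), (pj : Int))) := by
    refine ⟨by rw [pv_length_pvSet]; simp [hb0], fun i => by rw [pv_rowlen_pvSet]; exact pv_rowlen_map chessboard i, ?_⟩
    intro x y hx hxR hy hyC
    constructor
    · intro hmem
      have hxy : (x, y) = ((pi : Int), (pj : Int)) := by
        rcases (PySem.Set.mem_add PySem.Set.empty ((pi : Int), (pj : Int)) (x, y)).mp hmem with h | h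
        · cases h
        · exact h
      obtain ⟨h1, h2⟩ := Prod.mk.injEq .. ▸ hxy
      subst h1; subst h2
      refine pvCell_pvSet_self b0 _ _ ?_ ?_
      · simp [hb0]; omega
      · rw [hb0, show ((pi : Int)).toNat = pi from Int.toNat_natCast pi, pv_rowlen_map chessboard pi]
        have h2 := hC pi hi
        rw [hCdef] at h2
        omega
    · intro hmem
      have hne : ¬(x = (pi : Int) ∧ y = (pj : Int)) := by
        rintro ⟨h1, h2⟩
        exact hmem ((PySem.Set.mem_add PySem.Set.empty _ (x, y)).mpr (Or.inr (by rw [h1, h2])))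
      rw [pvCell_pvSet_ne b0 _ _ x y (by omega) (by omega) hx hy hne]
      exact pvCell_map chessboard x y
  have hInv : pvInv chessboard C (pvSet b0 (pi : Int) (pj : Int), [((pi : Int), (pj : Int))], 0)
      (PySem.Set.add PySem.Set.empty ((pi : Int), (pj : Int)), [((pi : Int), (pj : Int))]) 0 :=
    ⟨hGood, rfl, by simp, by simp⟩
  have hsim := pvLoop_sim chessboard C (chessboard.length + (chessboard.headD "").toList.length + 2) hC
    (chessboard.length * (chessboard.headD "").toList.length + 2)
    (pvSet b0 (pi : Int) (pj : Int), [((pi : Int), (pj : Int))], 0)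
    (PySem.Set.add PySem.Set.empty ((pi : Int), (pj : Int))) [((pi : Int), (pj : Int))] 0 hInv
  show pvBfsA chessboard (pi : Int) (pj : Int) = _
  unfold pvBfsA pvCascadeB
  simp only [← hb0]
  have hlen : (b0.length : Int) = (chessboard.length : Int) := by simp [hb0]
  have hrow0 : ((b0.getD 0 []).length : Int) = C := by rw [hCdef]; exact_mod_cast congrArg Nat.cast (pv_row0_map chessboard)
  rw [hlen, hrow0]
  simp only [Int.toNat_natCast]
  exact hsim


-- ---- the abstract capture layer: both algorithms compute the least capture-closed set ----

def pvInBd (R C : Int) (p : Int × Int) : Prop :=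
  0 ≤ p.1 ∧ p.1 < R ∧ 0 ≤ p.2 ∧ p.2 < C
def pvFlip (board0 : List String) (R C : Int) (p : Int × Int) : Prop :=
  pvInBd R C p ∧ pvCellB board0 p.1 p.2 ≠ 'X' ∧ pvCellB board0 p.1 p.2 ≠ '.'

def pvAt (c d : Int × Int) (i : Int) : Int × Int := (c.1 + i * d.1, c.2 + i * d.2)

def pvStop (board0 : List String) (R C : Int) (fl : List (Int × Int)) (p : Int × Int) : Prop :=
  pvInBd R C p ∧ (p ∈ fl ∨ pvCellB board0 p.1 p.2 = 'X')

-- capture of the run c+d, …, c+k·d from c (bounded by a flipped or 'X' cell at c+(k+1)·d)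
def pvCaptK (board0 : List String) (R C : Int) (fl : List (Int × Int))
    (c d : Int × Int) (k : Nat) : Prop :=
  c ∈ fl ∧ d ∈ pvDirsB ∧ 1 ≤ k ∧
  (∀ i : Nat, 1 ≤ i → i ≤ k → pvFlip board0 R C (pvAt c d (i : Int)) ∧ pvAt c d (i : Int) ∉ fl) ∧
  pvStop board0 R C fl (pvAt c d ((k : Int) + 1))

def pvClosed (board0 : List String) (R C : Int) (fl : List (Int × Int)) : Prop :=
  ∀ c d k, ¬ pvCaptK board0 R C fl c d k

theorem pvAt_zero (s d : Int × Int) : pvAt s d 0 = s := by simp [pvAt]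

theorem pvAt_shift (s d : Int × Int) (a b : Int) : pvAt (pvAt s d a) d b = pvAt s d (a + b) := by
  simp only [pvAt, Prod.mk.injEq]; constructor <;> ring

theorem pvAt_one (s d : Int × Int) : pvAt s d 1 = (s.1 + d.1, s.2 + d.2) := by simp [pvAt]

theorem pvAt_inj (s d : Int × Int) (hd : d ∈ pvDirsB) (i j : Int) (h : pvAt s d i = pvAt s d j) :
    i = j := by
  simp only [pvDirsB, List.mem_cons, List.not_mem_nil, or_false] at hd
  simp only [pvAt, Prod.mk.injEq] at h
  rcases hd with h' | h' | h' | h' | h' | h' | h' | h' <;> subst h' <;> simp at h <;> omega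

theorem pv_neg_mem_dirs (d : Int × Int) (hd : d ∈ pvDirsB) : (-d.1, -d.2) ∈ pvDirsB := by
  simp only [pvDirsB, List.mem_cons, List.not_mem_nil, or_false] at hd ⊢
  rcases hd with h | h | h | h | h | h | h | h <;> subst h <;> simp

-- forward characterization of the shared ray walk
theorem pvRay_char (board0 : List String) (fl : PySem.Set (Int × Int)) (R C : Int)
    (d : Int × Int) :
    ∀ (f : Nat) (s : Int × Int) (seg : List (Int × Int)),
      pvRayB board0 fl R C d.1 d.2 s.1 s.2 f = some seg →
      (∀ j : Nat, j < seg.length →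
        seg[j]? = some (pvAt s d (j : Int)) ∧ pvFlip board0 R C (pvAt s d (j : Int)) ∧
          pvAt s d (j : Int) ∉ fl) ∧
      pvStop board0 R C fl (pvAt s d (seg.length : Int)) := by
  intro f
  induction f with
  | zero => intro s seg h; exact absurd h (by simp [pvRayB])
  | succ f ih =>
    intro s seg h
    simp only [pvRayB] at h
    by_cases hb : 0 ≤ s.1 ∧ s.1 < R ∧ 0 ≤ s.2 ∧ s.2 < C
    · rw [if_pos hb] at h
      by_cases hhit : (s.1, s.2) ∈ fl ∨ pvCellB board0 s.1 s.2 = 'X'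
      · rw [if_pos hhit] at h
        obtain rfl : ([] : List (Int × Int)) = seg := Option.some.injEq .. ▸ h
        refine ⟨fun j hj => absurd hj (by simp), ?_⟩
        simp only [List.length_nil, Nat.cast_zero, pvAt_zero]
        exact ⟨⟨hb.1, hb.2.1, hb.2.2.1, hb.2.2.2⟩, by simpa using hhit⟩
      · rw [if_neg hhit] at h
        by_cases hD : pvCellB board0 s.1 s.2 = '.'
        · rw [if_pos hD] at h; exact absurd h (by simp)
        · rw [if_neg hD] at h
          cases hrec : pvRayB board0 fl R C d.1 d.2 (s.1 + d.1) (s.2 + d.2) f with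
          | none => rw [hrec] at h; exact absurd h (by simp)
          | some seg' =>
            rw [hrec] at h
            obtain rfl : (s.1, s.2) :: seg' = seg := Option.some.injEq .. ▸ h
            have hs' : (s.1 + d.1, s.2 + d.2) = pvAt s d 1 := (pvAt_one s d).symm
            have hrec' : pvRayB board0 fl R C d.1 d.2 (pvAt s d 1).1 (pvAt s d 1).2 f
                = some seg' := by rw [← hs']; exact hrec
            obtain ⟨hcells, hstop⟩ := ih (pvAt s d 1) seg' hrec'
            have hsfl : (s.1, s.2) ∉ fl := fun hm => hhit (Or.inl hm)
            have hsX : pvCellB board0 s.1 s.2 ≠ 'X' := fun hm => hhit (Or.inr hm)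
            refine ⟨?_, ?_⟩
            · intro j hj
              cases j with
              | zero =>
                simp only [Nat.cast_zero, pvAt_zero]
                exact ⟨by simp, ⟨⟨hb.1, hb.2.1, hb.2.2.1, hb.2.2.2⟩, by simpa using hsX,
                  by simpa using hD⟩, by simpa using hsfl⟩
              | succ j =>
                have hj' : j < seg'.length := by simpa using hj
                obtain ⟨hg, hf, hnm⟩ := hcells j hj'
                rw [pvAt_shift] at hg hf hnm
                have harith : (1 : Int) + (j : Int) = ((j + 1 : Nat) : Int) := by push_cast; ring
                rw [harith] at hg hf hnm
                exact ⟨by simpa using hg, hf, hnm⟩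
            · rw [pvAt_shift] at hstop
              have harith : (1 : Int) + ((seg'.length : Nat) : Int)
                  = ((((s.1, s.2) :: seg').length : Nat) : Int) := by simp only [List.length_cons]; push_cast; ring
              rw [harith] at hstop
              exact hstop
    · rw [if_neg hb] at h; exact absurd h (by simp)

-- completeness of the shared ray walk (enough fuel + a valid run ⇒ the walk succeeds)
theorem pvRay_complete (board0 : List String) (fl : PySem.Set (Int × Int)) (R C : Int)
    (d : Int × Int) :
    ∀ (f n : Nat) (s : Int × Int),
      (∀ j : Nat, j < n → pvFlip board0 R C (pvAt s d (j : Int)) ∧ pvAt s d (j : Int) ∉ fl) →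
      pvStop board0 R C fl (pvAt s d (n : Int)) →
      n + 1 ≤ f →
      (pvRayB board0 fl R C d.1 d.2 s.1 s.2 f).isSome := by
  intro f
  induction f with
  | zero => intro n s _ _ hf; omega
  | succ f ih =>
    intro n s hcells hstop hf
    simp only [pvRayB]
    cases n with
    | zero =>
      simp only [Nat.cast_zero, pvAt_zero] at hstop
      obtain ⟨hin, hdis⟩ := hstop
      rw [if_pos (by exact ⟨hin.1, hin.2.1, hin.2.2.1, hin.2.2.2⟩),
        if_pos (by simpa using hdis)]
      simp
    | succ n =>
      have h0 := hcells 0 (by omega)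
      simp only [Nat.cast_zero, pvAt_zero] at h0
      obtain ⟨⟨hin, hX, hD⟩, hnm⟩ := h0
      rw [if_pos (by exact ⟨hin.1, hin.2.1, hin.2.2.1, hin.2.2.2⟩)]
      rw [if_neg (by
        intro h
        rcases h with h | h
        · exact hnm (by simpa using h)
        · exact hX h)]
      rw [if_neg hD]
      have hs' : ((s.1 + d.1, s.2 + d.2) : Int × Int) = pvAt s d 1 := (pvAt_one s d).symm
      have hrec := ih n (pvAt s d 1) (fun j hj => by
          have := hcells (j + 1) (by omega)
          rw [pvAt_shift]
          have harith : (1 : Int) + (j : Int) = ((j + 1 : Nat) : Int) := by push_cast; ring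
          rw [harith]
          exact this)
        (by
          rw [pvAt_shift]
          have harith : (1 : Int) + (n : Int) = ((n + 1 : Nat) : Int) := by push_cast; ring
          rw [harith]
          exact hstop)
        (by omega)
      rw [← hs'] at hrec
      cases hr : pvRayB board0 fl R C d.1 d.2 (s.1 + d.1) (s.2 + d.2) f with
      | none => rw [hr] at hrec; simp at hrec
      | some seg' => simp

-- the size of a capture run is bounded by the board
theorem pvCaptK_bound (board0 : List String) (R C : Int) (fl : List (Int × Int))
    (c d : Int × Int) (k : Nat) (h : pvCaptK board0 R C fl c d k) :
    k ≤ R.toNat + C.toNat := by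
  obtain ⟨_, hd, hk1, hcells, hstop⟩ := h
  have h1 := (hcells 1 (by omega) (by omega)).1.1
  have h2 := hstop.1
  simp only [pvDirsB, List.mem_cons, List.not_mem_nil, or_false] at hd
  simp only [pvInBd, pvAt] at h1 h2
  rcases hd with h' | h' | h' | h' | h' | h' | h' | h' <;> subst h' <;> simp at h1 h2 <;> omega

-- a capture from c in direction d makes the ray walk from c+d succeed, flipping c+d
theorem pvCaptK_ray (board0 : List String) (R C : Int) (fl : PySem.Set (Int × Int))
    (c d : Int × Int) (k : Nat) (f : Nat) (h : pvCaptK board0 R C fl c d k)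
    (hf : k + 2 ≤ f) :
    ∃ seg, pvRayB board0 fl R C d.1 d.2 (c.1 + d.1) (c.2 + d.2) f = some seg ∧
      pvAt c d 1 ∈ seg := by
  obtain ⟨hc, hd, hk1, hcells, hstop⟩ := h
  have hs : ((c.1 + d.1, c.2 + d.2) : Int × Int) = pvAt c d 1 := (pvAt_one c d).symm
  have hsome : (pvRayB board0 fl R C d.1 d.2 (c.1 + d.1) (c.2 + d.2) f).isSome := by
    rw [show (c.1 + d.1) = (pvAt c d 1).1 by rw [← hs], show (c.2 + d.2) = (pvAt c d 1).2 by rw [← hs]]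
    refine pvRay_complete board0 fl R C d f k (pvAt c d 1) (fun j hj => ?_) ?_ (by omega)
    · rw [pvAt_shift]
      have harith : (1 : Int) + (j : Int) = ((j + 1 : Nat) : Int) := by push_cast; ring
      rw [harith]
      exact hcells (j + 1) (by omega) (by omega)
    · rw [pvAt_shift]
      have harith : (1 : Int) + (k : Int) = (k : Int) + 1 := by ring
      rw [harith]
      exact hstop
  obtain ⟨seg, hseg⟩ := Option.isSome_iff_exists.mp hsome
  refine ⟨seg, hseg, ?_⟩
  have hseg' : pvRayB board0 fl R C d.1 d.2 (pvAt c d 1).1 (pvAt c d 1).2 f = some seg := by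
    rw [← hs]; exact hseg
  obtain ⟨hcells', hstop'⟩ := pvRay_char board0 fl R C d f (pvAt c d 1) seg hseg'
  have hne : seg.length ≠ 0 := by
    intro h0
    rw [h0] at hstop'
    simp only [Nat.cast_zero, pvAt_zero] at hstop'
    have h1 := hcells 1 (by omega) (by omega)
    rw [show ((1 : Nat) : Int) = 1 by simp] at h1
    rcases hstop'.2 with hm | hX
    · exact h1.2 hm
    · exact h1.1.2.1 hX
  have h0 := (hcells' 0 (by omega)).1
  simp only [Nat.cast_zero, pvAt_zero] at h0
  exact List.mem_of_getElem? h0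


-- ---- membership/nodup utilities ----

theorem pv_mem_foldl_add (seg : List (Int × Int)) :
    ∀ (s : PySem.Set (Int × Int)) (p : Int × Int),
      p ∈ seg.foldl PySem.Set.add s ↔ p ∈ s ∨ p ∈ seg := by
  induction seg with
  | nil => intro s p; simp
  | cons a rest ih =>
    intro s p
    simp only [List.foldl_cons, ih, PySem.Set.mem_add, List.mem_cons]
    tauto

theorem pv_len_bound (R C : Int) (l : List (Int × Int)) (hnd : l.Nodup)
    (hin : ∀ p ∈ l, pvInBd R C p) : l.length ≤ R.toNat * C.toNat := by
  have h1 : l.toFinset ⊆ Finset.Ico 0 R ×ˢ Finset.Ico 0 C := by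
    intro p hp
    obtain ⟨h1, h2, h3, h4⟩ := hin p (List.mem_toFinset.mp hp)
    simp only [Finset.mem_product, Finset.mem_Ico]
    exact ⟨⟨h1, h2⟩, ⟨h3, h4⟩⟩
  calc l.length = l.toFinset.card := (List.toFinset_card_of_nodup hnd).symm
    _ ≤ (Finset.Ico 0 R ×ˢ Finset.Ico 0 C).card := Finset.card_le_card h1
    _ = R.toNat * C.toNat := by rw [Finset.card_product, Int.card_Ico, Int.card_Ico]; simp

theorem pvRay_eq_map (board0 : List String) (fl : PySem.Set (Int × Int)) (R C : Int)
    (d : Int × Int) (f : Nat) (s : Int × Int) (seg : List (Int × Int))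
    (h : pvRayB board0 fl R C d.1 d.2 s.1 s.2 f = some seg) :
    seg = (List.range seg.length).map (fun j : Nat => pvAt s d (j : Int)) := by
  obtain ⟨hcells, _⟩ := pvRay_char board0 fl R C d f s seg h
  apply List.ext_getElem?
  intro j
  by_cases hj : j < seg.length
  · rw [(hcells j hj).1, List.getElem?_map, List.getElem?_range hj]
    rfl
  · rw [List.getElem?_eq_none_iff.mpr (by omega), Eq.comm, List.getElem?_eq_none_iff]
    simp only [List.length_map, List.length_range]
    omega

theorem pvRay_nodup (board0 : List String) (fl : PySem.Set (Int × Int)) (R C : Int)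
    (d : Int × Int) (hd : d ∈ pvDirsB) (f : Nat) (s : Int × Int) (seg : List (Int × Int))
    (h : pvRayB board0 fl R C d.1 d.2 s.1 s.2 f = some seg) : seg.Nodup := by
  rw [pvRay_eq_map board0 fl R C d f s seg h]
  have hinj : Function.Injective (fun j : Nat => pvAt s d (j : Int)) := by
    intro i j hij
    have := pvAt_inj s d hd (i : Int) (j : Int) hij
    exact_mod_cast this
  exact (List.nodup_range).map hinj

theorem pv_mem_ray (board0 : List String) (fl : PySem.Set (Int × Int)) (R C : Int)
    (d : Int × Int) (f : Nat) (s : Int × Int) (seg : List (Int × Int))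
    (h : pvRayB board0 fl R C d.1 d.2 s.1 s.2 f = some seg) (p : Int × Int) (hp : p ∈ seg) :
    ∃ j : Nat, j < seg.length ∧ p = pvAt s d (j : Int) := by
  obtain ⟨hcells, _⟩ := pvRay_char board0 fl R C d f s seg h
  obtain ⟨j, hj, hget⟩ := List.mem_iff_getElem.mp hp
  refine ⟨j, hj, ?_⟩
  have h2 := (hcells j hj).1
  rw [List.getElem?_eq_getElem hj, hget] at h2
  exact Option.some_inj.mp h2

-- ---- the absorb lemma: a closed set swallows any bounded run starting at one of its cells ----

theorem pvAbsorb (board0 : List String) (R C : Int) (T : List (Int × Int))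
    (hcl : pvClosed board0 R C T) :
    ∀ n : Nat, ∀ c d : Int × Int, c ∈ T → pvInBd R C c → d ∈ pvDirsB →
      (∀ i : Nat, 1 ≤ i → i ≤ n → pvFlip board0 R C (pvAt c d (i : Int))) →
      pvStop board0 R C T (pvAt c d ((n : Int) + 1)) →
      ∀ i : Nat, 1 ≤ i → i ≤ n → pvAt c d (i : Int) ∈ T := by
  intro n
  induction n using Nat.strong_induction_on with
  | _ n ih =>
    intro c d hcT hcin hd hcells hstop i hi1 hin
    have hn1 : 1 ≤ n := le_trans hi1 hin
    -- first cell of the run is in T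
    have h1 : pvAt c d 1 ∈ T := by
      by_contra hn1T
      let P : Nat → Prop := fun j => 2 ≤ j ∧ j ≤ n + 1 ∧ (pvAt c d (j : Int) ∈ T ∨ j = n + 1)
      haveI : DecidablePred P := fun j => by dsimp only [P]; infer_instance
      have hex : ∃ j, P j := ⟨n + 1, by omega, le_refl _, Or.inr rfl⟩
      obtain ⟨jm, hjmeq⟩ : ∃ jm, jm = Nat.find hex := ⟨Nat.find hex, rfl⟩
      obtain ⟨hjm2, hjmn, hjmT⟩ : P jm := hjmeq ▸ Nat.find_spec hex
      have hmin : ∀ m, m < jm → ¬ P m := fun m hm => Nat.find_min hex (hjmeq ▸ hm)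
      have hcapt : pvCaptK board0 R C T c d (jm - 1) := by
        refine ⟨hcT, hd, by omega, ?_, ?_⟩
        · intro i' h1' h2'
          refine ⟨hcells i' h1' (by omega), ?_⟩
          rcases Nat.lt_or_ge i' 2 with h | h
          · have : i' = 1 := by omega
            subst this
            simpa using hn1T
          · intro hmem
            exact hmin i' (by omega) ⟨h, by omega, Or.inl hmem⟩
        · have hc : ((jm - 1 : Nat) : Int) + 1 = (jm : Int) := by
            have : 1 ≤ jm := by omega
            push_cast [Nat.cast_sub this]
            ring
          rw [hc]
          rcases hjmT with hmem | heq
          · refine ⟨?_, Or.inl hmem⟩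
            rcases Nat.lt_or_ge n jm with h | h
            · have heq : jm = n + 1 := by omega
              rw [heq]
              push_cast
              exact hstop.1
            · exact (hcells jm (by omega) h).1
          · rw [heq]
            push_cast
            exact ⟨hstop.1, hstop.2⟩
      exact hcl c d (jm - 1) hcapt
    rcases Nat.lt_or_ge i 2 with hi2 | hi2
    · have : i = 1 := by omega
      subst this
      simpa using h1
    · -- recurse from the first cell
      have h1in : pvInBd R C (pvAt c d 1) := (hcells 1 (by omega) (by omega)).1
      have hrec := ih (n - 1) (by omega) (pvAt c d 1) d h1
        (by simpa using h1in) hd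
        (fun i' h1' h2' => by
          rw [pvAt_shift]
          have : (1 : Int) + (i' : Int) = ((i' + 1 : Nat) : Int) := by push_cast; ring
          rw [this]
          exact hcells (i' + 1) (by omega) (by omega))
        (by
          rw [pvAt_shift]
          have : (1 : Int) + (((n - 1 : Nat) : Int) + 1) = ((n : Int) + 1) := by
            push_cast [Nat.cast_sub hn1]
            ring
          rw [this]
          exact hstop)
        (i - 1) (by omega) (by omega)
      rw [pvAt_shift] at hrec
      have : (1 : Int) + ((i - 1 : Nat) : Int) = (i : Int) := by
        push_cast [Nat.cast_sub (by omega : 1 ≤ i)]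
        ring
      rw [this] at hrec
      exact hrec

-- ---- the worklist invariants ----

def pvWInv (R C : Int) (fl : PySem.Set (Int × Int)) (order : List (Int × Int)) : Prop :=
  (∀ p, p ∈ fl ↔ p ∈ order) ∧ order.Nodup ∧ (∀ p ∈ fl, pvInBd R C p)

def pvPend (board0 : List String) (R C : Int) (fl : PySem.Set (Int × Int))
    (rq : List (Int × Int)) (t : Int × Int) (ds : List (Int × Int)) : Prop :=
  ∀ c d k, pvCaptK board0 R C fl c d k →
    c ∈ rq ∨ pvAt c d ((k : Int) + 1) ∈ rq ∨ (c = t ∧ d ∈ ds) ∨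
      (pvAt c d ((k : Int) + 1) = t ∧ (-d.1, -d.2) ∈ ds)

theorem pvAt_rev (c d : Int × Int) (a i : Int) :
    pvAt (pvAt c d a) (-d.1, -d.2) i = pvAt c d (a - i) := by
  simp only [pvAt, Prod.mk.injEq]
  constructor <;> ring

-- reversing a capture whose terminator is t
theorem pvCaptK_rev (board0 : List String) (R C : Int) (fl : List (Int × Int))
    (c d : Int × Int) (k : Nat) (h : pvCaptK board0 R C fl c d k)
    (t : Int × Int) (hterm : pvAt c d ((k : Int) + 1) = t) (hcin : pvInBd R C c)
    (htfl : t ∈ fl) :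
    pvCaptK board0 R C fl t (-d.1, -d.2) k := by
  obtain ⟨hc, hd, hk1, hcells, hstop⟩ := h
  have hrev : ∀ i : Int, pvAt t (-d.1, -d.2) i = pvAt c d ((k : Int) + 1 - i) := by
    intro i
    rw [← hterm, pvAt_rev]
  refine ⟨htfl, pv_neg_mem_dirs d hd, hk1, ?_, ?_⟩
  · intro i h1 h2
    rw [hrev (i : Int)]
    have hc' : (k : Int) + 1 - (i : Int) = ((k + 1 - i : Nat) : Int) := by
      push_cast [Nat.cast_sub (by omega : i ≤ k + 1)]
      ring
    rw [hc']
    exact hcells (k + 1 - i) (by omega) (by omega)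
  · rw [hrev ((k : Int) + 1)]
    have : (k : Int) + 1 - ((k : Int) + 1) = 0 := by ring
    rw [this, pvAt_zero]
    exact ⟨hcin, Or.inl hc⟩

-- ---- one direction of one popped cell preserves the invariants ----

theorem pvDir_inv (board0 : List String) (R C : Int) (fr : Nat)
    (hfr : R.toNat + C.toNat + 2 ≤ fr)
    (t e : Int × Int) (he : e ∈ pvDirsB) (k0 : Nat)
    (fl : PySem.Set (Int × Int)) (order ds : List (Int × Int))
    (hW : pvWInv R C fl order) (ht : t ∈ fl) (hk : k0 + 1 ≤ order.length)
    (hP : pvPend board0 R C fl (order.drop (k0 + 1)) t (e :: ds)) :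
    pvWInv R C (pvDirB board0 R C fr t (fl, order) e).1 (pvDirB board0 R C fr t (fl, order) e).2 ∧
    (∃ ext, (pvDirB board0 R C fr t (fl, order) e).2 = order ++ ext) ∧
    (∀ p ∈ fl, p ∈ (pvDirB board0 R C fr t (fl, order) e).1) ∧
    pvPend board0 R C (pvDirB board0 R C fr t (fl, order) e).1
      ((pvDirB board0 R C fr t (fl, order) e).2.drop (k0 + 1)) t ds ∧
    (∀ T, pvClosed board0 R C T → (∀ p ∈ fl, p ∈ T) →
      ∀ p ∈ (pvDirB board0 R C fr t (fl, order) e).1, p ∈ T) := by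
  have hfuel : ∀ k c' d', pvCaptK board0 R C fl c' d' k → k + 2 ≤ fr := by
    intro k c' d' hcp
    have := pvCaptK_bound board0 R C fl c' d' k hcp
    omega
  have hs1 : pvAt t e 1 = ((t.1 + e.1, t.2 + e.2) : Int × Int) := pvAt_one t e
  -- the three cases of pvDirB
  cases hray : pvRayB board0 fl R C e.1 e.2 (t.1 + e.1) (t.2 + e.2) fr with
  | none =>
    have hst : pvDirB board0 R C fr t (fl, order) e = (fl, order) := by
      simp only [pvDirB, hray]
    rw [hst]
    refine ⟨hW, ⟨[], by simp⟩, fun p hp => hp, ?_, fun T _ hT p hp => hT p hp⟩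
    intro c d k hcp
    rcases hP c d k hcp with h | h | ⟨hc, hdm⟩ | ⟨hc, hdm⟩
    · exact Or.inl h
    · exact Or.inr (Or.inl h)
    · rcases List.mem_cons.mp hdm with rfl | hdm'
      · -- d = e and c = t: the ray walk from t in e would have succeeded
        rw [hc] at hcp
        obtain ⟨seg, hseg, _⟩ := pvCaptK_ray board0 R C fl t d k fr hcp (hfuel k t d hcp)
        rw [hray] at hseg
        cases hseg
      · exact Or.inr (Or.inr (Or.inl ⟨hc, hdm'⟩))
    · rcases List.mem_cons.mp hdm with heq | hdm'
      · -- -d = e and the terminator is t: the reversed capture makes the walk succeed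
        have hcin : pvInBd R C c := hW.2.2 c hcp.1
        have hrev := pvCaptK_rev board0 R C fl c d k hcp t hc hcin ht
        rw [heq] at hrev
        obtain ⟨seg, hseg, _⟩ := pvCaptK_ray board0 R C fl t e k fr hrev (hfuel k t e hrev)
        rw [hray] at hseg
        cases hseg
      · exact Or.inr (Or.inr (Or.inr ⟨hc, hdm'⟩))
  | some seg =>
    obtain ⟨hcells, hstop⟩ := pvRay_char board0 fl R C e fr (t.1 + e.1, t.2 + e.2) seg hray
    by_cases hemp : seg.isEmpty
    · have hnil : seg = [] := List.isEmpty_iff.mp hemp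
      subst hnil
      have hst : pvDirB board0 R C fr t (fl, order) e = (fl, order) := by
        simp only [pvDirB, hray, List.isEmpty_nil, if_true]
      rw [hst]
      simp only [List.length_nil, Nat.cast_zero, pvAt_zero] at hstop
      -- the cell right next to t in direction e is already flipped or an X
      have hnocap : ∀ k, ¬ pvCaptK board0 R C fl t e k := by
        intro k hcp
        have hk1 : 1 ≤ k := hcp.2.2.1
        have h1 := (hcp.2.2.2.1 1 (by omega) (by omega))
        rw [show ((1 : Nat) : Int) = 1 by simp, hs1] at h1
        rcases hstop.2 with hm | hX
        · exact h1.2 hm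
        · exact h1.1.2.1 hX
      refine ⟨hW, ⟨[], by simp⟩, fun p hp => hp, ?_, fun T _ hT p hp => hT p hp⟩
      intro c d k hcp
      rcases hP c d k hcp with h | h | ⟨hc, hdm⟩ | ⟨hc, hdm⟩
      · exact Or.inl h
      · exact Or.inr (Or.inl h)
      · rcases List.mem_cons.mp hdm with rfl | hdm'
        · rw [hc] at hcp; exact absurd hcp (hnocap k)
        · exact Or.inr (Or.inr (Or.inl ⟨hc, hdm'⟩))
      · rcases List.mem_cons.mp hdm with heq | hdm'
        · have hcin : pvInBd R C c := hW.2.2 c hcp.1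
          have hrev := pvCaptK_rev board0 R C fl c d k hcp t hc hcin ht
          rw [heq] at hrev
          exact absurd hrev (hnocap k)
        · exact Or.inr (Or.inr (Or.inr ⟨hc, hdm'⟩))
    · -- a nonempty ray is flipped and appended
      have hst : pvDirB board0 R C fr t (fl, order) e =
          (seg.foldl PySem.Set.add fl, order ++ seg) := by
        simp only [pvDirB, hray, hemp]
        exact pv_foldl_pair seg fl order
      rw [hst]
      have hmem' : ∀ p, p ∈ seg.foldl PySem.Set.add fl ↔ p ∈ fl ∨ p ∈ seg :=
        fun p => pv_mem_foldl_add seg fl p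
      have hsegP : ∀ p ∈ seg, pvFlip board0 R C p ∧ p ∉ fl := by
        intro p hp
        obtain ⟨j, hj, rfl⟩ :=
          pv_mem_ray board0 fl R C e fr ((t.1 + e.1, t.2 + e.2) : Int × Int) seg hray p hp
        exact ⟨(hcells j hj).2.1, (hcells j hj).2.2⟩
      have hdrop : (order ++ seg).drop (k0 + 1) = order.drop (k0 + 1) ++ seg :=
        List.drop_append_of_le_length hk
      have hsegnd : seg.Nodup :=
        pvRay_nodup board0 fl R C e he fr ((t.1 + e.1, t.2 + e.2) : Int × Int) seg hray
      constructor
      · -- pvWInv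
        refine ⟨fun p => by
            rw [hmem', List.mem_append, hW.1], ?_, ?_⟩
        · exact hW.2.1.append hsegnd
            (fun p hpo hps => (hsegP p hps).2 ((hW.1 p).mpr hpo))
        · intro p hp
          rcases (hmem' p).mp hp with h | h
          · exact hW.2.2 p h
          · exact (hsegP p h).1.1
      refine ⟨⟨seg, rfl⟩, fun p hp => (hmem' p).mpr (Or.inl hp), ?_, ?_⟩
      · -- pvPend for the remaining directions
        intro c d k hcp
        by_cases hcseg : c ∈ seg ∨ pvAt c d ((k : Int) + 1) ∈ seg
        · rcases hcseg with h | h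
          · exact Or.inl (by rw [hdrop]; exact List.mem_append_right _ h)
          · exact Or.inr (Or.inl (by rw [hdrop]; exact List.mem_append_right _ h))
        · rw [not_or] at hcseg
          -- transfer the capture down to fl
          have hcp' : pvCaptK board0 R C fl c d k := by
            obtain ⟨hc, hd, hk1, hcl', hstop'⟩ := hcp
            refine ⟨?_, hd, hk1, ?_, ?_⟩
            · rcases (hmem' c).mp hc with h | h
              · exact h
              · exact absurd h hcseg.1
            · intro i h1 h2
              refine ⟨(hcl' i h1 h2).1, fun hm => (hcl' i h1 h2).2 ((hmem' _).mpr (Or.inl hm))⟩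
            · refine ⟨hstop'.1, ?_⟩
              rcases hstop'.2 with hm | hX
              · rcases (hmem' _).mp hm with h | h
                · exact Or.inl h
                · exact absurd h hcseg.2
              · exact Or.inr hX
          rcases hP c d k hcp' with h | h | ⟨hc, hdm⟩ | ⟨hc, hdm⟩
          · exact Or.inl (by rw [hdrop]; exact List.mem_append_left _ h)
          · exact Or.inr (Or.inl (by rw [hdrop]; exact List.mem_append_left _ h))
          · rcases List.mem_cons.mp hdm with rfl | hdm'
            · -- d = e, c = t: the very walk we just performed flipped t+e
              rw [hc] at hcp hcp'
              obtain ⟨seg₂, hseg₂, hhead⟩ :=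
                pvCaptK_ray board0 R C fl t d k fr hcp' (hfuel k t d hcp')
              rw [hray] at hseg₂
              obtain rfl : seg = seg₂ := Option.some_inj.mp hseg₂
              -- but the capture over the new set needs t+e unflipped
              have hk1 : 1 ≤ k := hcp.2.2.1
              have h1 := hcp.2.2.2.1 1 (by omega) (by omega)
              rw [show ((1 : Nat) : Int) = 1 by simp] at h1
              exact absurd ((hmem' _).mpr (Or.inr hhead)) h1.2
            · exact Or.inr (Or.inr (Or.inl ⟨hc, hdm'⟩))
          · rcases List.mem_cons.mp hdm with heq | hdm'
            · -- -d = e, terminator t: the walk flipped the last run cell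
              have hcin : pvInBd R C c := hW.2.2 c hcp'.1
              have hrev := pvCaptK_rev board0 R C fl c d k hcp' t hc hcin ht
              rw [heq] at hrev
              obtain ⟨seg₂, hseg₂, hhead⟩ :=
                pvCaptK_ray board0 R C fl t e k fr hrev (hfuel k t e hrev)
              rw [hray] at hseg₂
              obtain rfl : seg = seg₂ := Option.some_inj.mp hseg₂
              have hlast : pvAt t e 1 = pvAt c d (k : Int) := by
                rw [← hc, ← heq, pvAt_rev]
                congr 1
                ring
              have hk1 : 1 ≤ k := hcp.2.2.1
              have hkk := hcp.2.2.2.1 k (by omega) (by omega)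
              rw [← hlast] at hkk
              exact absurd ((hmem' _).mpr (Or.inr hhead)) hkk.2
            · exact Or.inr (Or.inr (Or.inr ⟨hc, hdm'⟩))
      · -- anything flipped lies in every closed superset
        intro T hcl hT p hp
        rcases (hmem' p).mp hp with h | h
        · exact hT p h
        · obtain ⟨j, hj, rfl⟩ :=
            pv_mem_ray board0 fl R C e fr ((t.1 + e.1, t.2 + e.2) : Int × Int) seg hray p h
          have htin : pvInBd R C t := hW.2.2 t ht
          have hshift : ∀ i : Nat, pvAt ((t.1 + e.1, t.2 + e.2) : Int × Int) e (i : Int)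
              = pvAt t e ((i : Int) + 1) := by
            intro i
            rw [← hs1, pvAt_shift]
            congr 1
            ring
          have habs := pvAbsorb board0 R C T hcl seg.length t e (hT t ht) htin he
            (fun i h1 h2 => by
              have := (hcells (i - 1) (by omega)).2.1
              rw [hshift (i - 1)] at this
              have hc' : ((i - 1 : Nat) : Int) + 1 = (i : Int) := by
                push_cast [Nat.cast_sub (by omega : 1 ≤ i)]
                ring
              rw [hc'] at this
              exact this)
            (by
              rw [show ((seg.length : Nat) : Int) + 1 = ((seg.length : Int) + 1) from rfl]
              have : pvAt t e ((seg.length : Int) + 1)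
                  = pvAt ((t.1 + e.1, t.2 + e.2) : Int × Int) e (seg.length : Int) := by
                rw [hshift seg.length]
              rw [this]
              refine ⟨hstop.1, ?_⟩
              rcases hstop.2 with hm | hX
              · exact Or.inl (hT _ hm)
              · exact Or.inr hX)
            (j + 1) (by omega) (by omega)
          have hcast : ((j + 1 : Nat) : Int) = (j : Int) + 1 := by push_cast; ring
          rw [hcast] at habs
          rw [← hshift j] at habs
          exact habs


-- ---- folding all eight directions of a popped cell ----

theorem pvStep_fold_inv (board0 : List String) (R C : Int) (fr : Nat)
    (hfr : R.toNat + C.toNat + 2 ≤ fr) (t : Int × Int) (k0 : Nat) :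
    ∀ (ds : List (Int × Int)), (∀ d ∈ ds, d ∈ pvDirsB) →
    ∀ (fl : PySem.Set (Int × Int)) (order : List (Int × Int)),
      pvWInv R C fl order → t ∈ fl → k0 + 1 ≤ order.length →
      pvPend board0 R C fl (order.drop (k0 + 1)) t ds →
      pvWInv R C (ds.foldl (pvDirB board0 R C fr t) (fl, order)).1
          (ds.foldl (pvDirB board0 R C fr t) (fl, order)).2 ∧
      (∃ ext, (ds.foldl (pvDirB board0 R C fr t) (fl, order)).2 = order ++ ext) ∧
      (∀ p ∈ fl, p ∈ (ds.foldl (pvDirB board0 R C fr t) (fl, order)).1) ∧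
      pvPend board0 R C (ds.foldl (pvDirB board0 R C fr t) (fl, order)).1
        ((ds.foldl (pvDirB board0 R C fr t) (fl, order)).2.drop (k0 + 1)) t [] ∧
      (∀ T, pvClosed board0 R C T → (∀ p ∈ fl, p ∈ T) →
        ∀ p ∈ (ds.foldl (pvDirB board0 R C fr t) (fl, order)).1, p ∈ T) := by
  intro ds
  induction ds with
  | nil =>
    intro _ fl order hW ht hk hP
    exact ⟨hW, ⟨[], by simp⟩, fun p hp => hp, hP, fun T _ hT p hp => hT p hp⟩
  | cons e rest ih =>
    intro hsub fl order hW ht hk hP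
    have he : e ∈ pvDirsB := hsub e (List.mem_cons_self ..)
    obtain ⟨hW1, ⟨ext1, hext1⟩, hmono1, hP1, hcl1⟩ :=
      pvDir_inv board0 R C fr hfr t e he k0 fl order rest hW ht hk hP
    have hfold : (e :: rest).foldl (pvDirB board0 R C fr t) (fl, order)
        = rest.foldl (pvDirB board0 R C fr t)
            ((pvDirB board0 R C fr t (fl, order) e).1, (pvDirB board0 R C fr t (fl, order) e).2) := by
      simp only [List.foldl_cons]
    rw [hfold]
    obtain ⟨hW2, ⟨ext2, hext2⟩, hmono2, hP2, hcl2⟩ :=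
      ih (fun d hd => hsub d (List.mem_cons_of_mem _ hd))
        (pvDirB board0 R C fr t (fl, order) e).1 (pvDirB board0 R C fr t (fl, order) e).2
        hW1 (hmono1 t ht) (by rw [hext1]; simp; omega) hP1
    refine ⟨hW2, ⟨ext1 ++ ext2, by rw [hext2, hext1, List.append_assoc]⟩,
      fun p hp => hmono2 p (hmono1 p hp), hP2, ?_⟩
    intro T hcl hT p hp
    exact hcl2 T hcl (fun q hq => hcl1 T hcl hT q hq) p hp

def pvPendQ (board0 : List String) (R C : Int) (fl : PySem.Set (Int × Int))
    (rq : List (Int × Int)) : Prop :=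
  ∀ c d k, pvCaptK board0 R C fl c d k → c ∈ rq ∨ pvAt c d ((k : Int) + 1) ∈ rq

-- ---- the whole worklist loop computes the least closed superset of the seed ----

theorem pvLoop_inv (board0 : List String) (R C : Int) (fr : Nat)
    (hfr : R.toNat + C.toNat + 2 ≤ fr) :
    ∀ (f : Nat) (fl : PySem.Set (Int × Int)) (order : List (Int × Int)) (k : Nat),
      pvWInv R C fl order → pvPendQ board0 R C fl (order.drop k) → k ≤ order.length →
      R.toNat * C.toNat + 2 ≤ k + f →
      ∃ flF orderF,
        pvLoopB board0 R C fr fl order k f = (orderF.length : Int) - 1 ∧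
        pvWInv R C flF orderF ∧ (∀ p ∈ fl, p ∈ flF) ∧ pvClosed board0 R C flF ∧
        (∀ T, pvClosed board0 R C T → (∀ p ∈ fl, p ∈ T) → ∀ p ∈ flF, p ∈ T) := by
  intro f
  induction f with
  | zero =>
    intro fl order k hW _ hk hfuel
    exfalso
    have hlen : order.length ≤ R.toNat * C.toNat :=
      pv_len_bound R C order hW.2.1 (fun p hp => hW.2.2 p ((hW.1 p).mpr hp))
    omega
  | succ f ih =>
    intro fl order k hW hQ hk hfuel
    cases hget : order[k]? with
    | none =>
      have hlen : order.length ≤ k := List.getElem?_eq_none_iff.mp hget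
      have hdk : order.drop k = [] := by rw [List.drop_eq_nil_iff]; omega
      rw [hdk] at hQ
      refine ⟨fl, order, by simp only [pvLoopB, hget], hW, fun p hp => hp, ?_,
        fun T _ hT p hp => hT p hp⟩
      intro c d kk hcp
      rcases hQ c d kk hcp with h | h <;> exact absurd h (List.not_mem_nil)
    | some t =>
      have hklt : k < order.length := by
        rcases Nat.lt_or_ge k order.length with h | h
        · exact h
        · rw [List.getElem?_eq_none_iff.mpr h] at hget; cases hget
      have htord : t ∈ order := by
        have := List.getElem?_eq_getElem hklt
        rw [this] at hget
        rw [← Option.some_inj.mp hget]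
        exact List.getElem_mem hklt
      have ht : t ∈ fl := (hW.1 t).mpr htord
      have hdk : order.drop k = t :: order.drop (k + 1) := by
        rw [← List.getElem_cons_drop hklt]
        congr 1
        have := List.getElem?_eq_getElem hklt
        rw [this] at hget
        exact Option.some_inj.mp hget
      have hP : pvPend board0 R C fl (order.drop (k + 1)) t pvDirsB := by
        intro c d kk hcp
        rcases hQ c d kk hcp with h | h
        · rw [hdk] at h
          rcases List.mem_cons.mp h with rfl | h'
          · exact Or.inr (Or.inr (Or.inl ⟨rfl, hcp.2.1⟩))
          · exact Or.inl h'
        · rw [hdk] at h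
          rcases List.mem_cons.mp h with heq | h'
          · exact Or.inr (Or.inr (Or.inr ⟨heq, pv_neg_mem_dirs d hcp.2.1⟩))
          · exact Or.inr (Or.inl h')
      obtain ⟨hW1, ⟨ext1, hext1⟩, hmono1, hP1, hcl1⟩ :=
        pvStep_fold_inv board0 R C fr hfr t k pvDirsB (fun d hd => hd) fl order hW ht
          (by omega) hP
      have hQ1 : pvPendQ board0 R C (pvDirsB.foldl (pvDirB board0 R C fr t) (fl, order)).1
          ((pvDirsB.foldl (pvDirB board0 R C fr t) (fl, order)).2.drop (k + 1)) := by
        intro c d kk hcp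
        rcases hP1 c d kk hcp with h | h | ⟨_, h⟩ | ⟨_, h⟩
        · exact Or.inl h
        · exact Or.inr h
        · exact absurd h (List.not_mem_nil)
        · exact absurd h (List.not_mem_nil)
      obtain ⟨flF, orderF, hres, hWF, hmonoF, hclF, hminF⟩ :=
        ih (pvDirsB.foldl (pvDirB board0 R C fr t) (fl, order)).1
          (pvDirsB.foldl (pvDirB board0 R C fr t) (fl, order)).2 (k + 1) hW1 hQ1
          (by rw [hext1]; simp; omega) (by omega)
      refine ⟨flF, orderF, ?_, hWF, fun p hp => hmonoF p (hmono1 p hp), hclF, ?_⟩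
      · simp only [pvLoopB, hget]
        exact hres
      · intro T hcl hT p hp
        exact hminF T hcl (fun q hq => hcl1 T hcl hT q hq) p hp


-- ---- B's captures(S): membership characterization ----

theorem pv_mem_foldl_inner (g : (Int × Int) → List (Int × Int)) :
    ∀ (ds : List (Int × Int)) (nw : PySem.Set (Int × Int)) (p : Int × Int),
      p ∈ ds.foldl (fun nw d => (g d).foldl PySem.Set.add nw) nw ↔
        p ∈ nw ∨ ∃ d ∈ ds, p ∈ g d := by
  intro ds
  induction ds with
  | nil => intro nw p; simp
  | cons d rest ih =>
    intro nw p
    simp only [List.foldl_cons, ih, pv_mem_foldl_add, List.mem_cons]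
    constructor
    · rintro (⟨h | h⟩ | ⟨d', hd', h⟩)
      · exact Or.inl h
      · exact Or.inr ⟨d, Or.inl rfl, h⟩
      · exact Or.inr ⟨d', Or.inr hd', h⟩
    · rintro (h | ⟨d', hd' | hd', h⟩)
      · exact Or.inl (Or.inl h)
      · exact Or.inl (Or.inr (hd' ▸ h))
      · exact Or.inr ⟨d', hd', h⟩

theorem pv_mem_capturesB (board0 : List String) (R C : Int) (fr : Nat)
    (S : PySem.Set (Int × Int)) (p : Int × Int) :
    p ∈ pvCapturesB board0 R C fr S ↔
      ∃ c ∈ S, ∃ d ∈ pvDirsB,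
        p ∈ (pvRayB board0 S R C d.1 d.2 (c.1 + d.1) (c.2 + d.2) fr).getD [] := by
  show p ∈ S.foldl _ PySem.Set.empty ↔ _
  have hgen : ∀ (cs : List (Int × Int)) (nw : PySem.Set (Int × Int)),
      p ∈ cs.foldl (fun nw c => pvDirsB.foldl (fun nw d =>
        ((pvRayB board0 S R C d.1 d.2 (c.1 + d.1) (c.2 + d.2) fr).getD []).foldl
          PySem.Set.add nw) nw) nw ↔
      p ∈ nw ∨ ∃ c ∈ cs, ∃ d ∈ pvDirsB,
        p ∈ (pvRayB board0 S R C d.1 d.2 (c.1 + d.1) (c.2 + d.2) fr).getD [] := by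
    intro cs
    induction cs with
    | nil => intro nw; simp
    | cons c rest ih =>
      intro nw
      simp only [List.foldl_cons, ih,
        pv_mem_foldl_inner (fun d => (pvRayB board0 S R C d.1 d.2 (c.1 + d.1) (c.2 + d.2) fr).getD []),
        List.mem_cons]
      constructor
      · rintro (⟨h | ⟨d, hd, h⟩⟩ | ⟨c', hc', d, hd, h⟩)
        · exact Or.inl h
        · exact Or.inr ⟨c, Or.inl rfl, d, hd, h⟩
        · exact Or.inr ⟨c', Or.inr hc', d, hd, h⟩
      · rintro (h | ⟨c', hc' | hc', d, hd, h⟩)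
        · exact Or.inl (Or.inl h)
        · exact Or.inl (Or.inr ⟨d, hd, hc' ▸ h⟩)
        · exact Or.inr ⟨c', hc', d, hd, h⟩
  rw [hgen S PySem.Set.empty]
  simp [PySem.Set.empty]

theorem pv_capturesB_props (board0 : List String) (R C : Int) (fr : Nat)
    (S : PySem.Set (Int × Int)) (p : Int × Int) (hp : p ∈ pvCapturesB board0 R C fr S) :
    pvFlip board0 R C p ∧ p ∉ S := by
  obtain ⟨c, _, d, _, h⟩ := (pv_mem_capturesB board0 R C fr S p).mp hp
  cases hr : pvRayB board0 S R C d.1 d.2 (c.1 + d.1) (c.2 + d.2) fr with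
  | none => rw [hr] at h; simp at h
  | some seg =>
    rw [hr] at h
    simp only [Option.getD_some] at h
    have hr' : pvRayB board0 S R C d.1 d.2 ((c.1 + d.1, c.2 + d.2) : Int × Int).1
        ((c.1 + d.1, c.2 + d.2) : Int × Int).2 fr = some seg := hr
    obtain ⟨j, hj, rfl⟩ := pv_mem_ray board0 S R C d fr _ seg hr' p h
    obtain ⟨hcells, _⟩ := pvRay_char board0 S R C d fr _ seg hr'
    exact ⟨(hcells j hj).2.1, (hcells j hj).2.2⟩

theorem pv_capturesB_closed (board0 : List String) (R C : Int) (fr : Nat)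
    (hfr : R.toNat + C.toNat + 2 ≤ fr) (S : PySem.Set (Int × Int))
    (hnil : pvCapturesB board0 R C fr S = []) : pvClosed board0 R C S := by
  intro c d k hcp
  have hb := pvCaptK_bound board0 R C S c d k hcp
  obtain ⟨seg, hseg, hhead⟩ := pvCaptK_ray board0 R C S c d k fr hcp (by omega)
  have : pvAt c d 1 ∈ pvCapturesB board0 R C fr S := by
    rw [pv_mem_capturesB]
    exact ⟨c, hcp.1, d, hcp.2.1, by rw [hseg]; simpa using hhead⟩
  rw [hnil] at this
  exact absurd this (List.not_mem_nil)

-- a ray computed over S lands inside any closed superset of S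
theorem pvRay_absorb (board0 : List String) (R C : Int) (T : List (Int × Int))
    (hcl : pvClosed board0 R C T) (S : PySem.Set (Int × Int)) (hST : ∀ p ∈ S, p ∈ T)
    (c d : Int × Int) (hcT : c ∈ T) (hcin : pvInBd R C c) (hd : d ∈ pvDirsB) (fr : Nat)
    (seg : List (Int × Int))
    (hray : pvRayB board0 S R C d.1 d.2 (c.1 + d.1) (c.2 + d.2) fr = some seg) :
    ∀ p ∈ seg, p ∈ T := by
  intro p hp
  have hray' : pvRayB board0 S R C d.1 d.2 ((c.1 + d.1, c.2 + d.2) : Int × Int).1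
      ((c.1 + d.1, c.2 + d.2) : Int × Int).2 fr = some seg := hray
  obtain ⟨j, hj, rfl⟩ := pv_mem_ray board0 S R C d fr _ seg hray' p hp
  obtain ⟨hcells, hstop⟩ := pvRay_char board0 S R C d fr _ seg hray'
  have hs1 : pvAt c d 1 = ((c.1 + d.1, c.2 + d.2) : Int × Int) := pvAt_one c d
  have hshift : ∀ i : Nat, pvAt ((c.1 + d.1, c.2 + d.2) : Int × Int) d (i : Int)
      = pvAt c d ((i : Int) + 1) := by
    intro i
    rw [← hs1, pvAt_shift]
    congr 1
    ring
  have habs := pvAbsorb board0 R C T hcl seg.length c d hcT hcin hd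
    (fun i h1 h2 => by
      have := (hcells (i - 1) (by omega)).2.1
      rw [hshift (i - 1)] at this
      have hc' : ((i - 1 : Nat) : Int) + 1 = (i : Int) := by
        push_cast [Nat.cast_sub (by omega : 1 ≤ i)]
        ring
      rw [hc'] at this
      exact this)
    (by
      rw [show ((seg.length : Nat) : Int) + 1 = ((seg.length : Int) + 1) from rfl]
      have heq : pvAt c d ((seg.length : Int) + 1)
          = pvAt ((c.1 + d.1, c.2 + d.2) : Int × Int) d (seg.length : Int) := by
        rw [hshift seg.length]
      rw [heq]
      refine ⟨hstop.1, ?_⟩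
      rcases hstop.2 with hm | hX
      · exact Or.inl (hST _ hm)
      · exact Or.inr hX)
    (j + 1) (by omega) (by omega)
  have hcast : ((j + 1 : Nat) : Int) = (j : Int) + 1 := by push_cast; ring
  rw [hcast] at habs
  rw [← hshift j] at habs
  exact habs

theorem pv_len_lt (S S' : List (Int × Int)) (hndS : S.Nodup) (hndS' : S'.Nodup)
    (hsub : ∀ p ∈ S, p ∈ S') (p₀ : Int × Int) (h₀ : p₀ ∈ S') (h₀n : p₀ ∉ S) :
    S.length < S'.length := by
  have hss : S.toFinset ⊂ S'.toFinset := by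
    refine Finset.ssubset_iff_of_subset (fun p hp => ?_) |>.mpr
      ⟨p₀, List.mem_toFinset.mpr h₀, fun hc => h₀n (List.mem_toFinset.mp hc)⟩
    exact List.mem_toFinset.mpr (hsub p (List.mem_toFinset.mp hp))
  have := Finset.card_lt_card hss
  rwa [List.toFinset_card_of_nodup hndS, List.toFinset_card_of_nodup hndS'] at this

-- ---- B's fixed-point iteration computes the least closed superset too ----

theorem pvIter_inv (board0 : List String) (R C : Int) (fr : Nat)
    (hfr : R.toNat + C.toNat + 2 ≤ fr) :
    ∀ (n : Nat) (S : PySem.Set (Int × Int)), S.Nodup → (∀ p ∈ S, pvInBd R C p) →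
      R.toNat * C.toNat + 1 ≤ n + S.length →
      (∀ p ∈ S, p ∈ pvIterB board0 R C fr S n) ∧
      (pvIterB board0 R C fr S n).Nodup ∧
      pvClosed board0 R C (pvIterB board0 R C fr S n) ∧
      (∀ T, pvClosed board0 R C T → (∀ p ∈ S, p ∈ T) →
        ∀ p ∈ pvIterB board0 R C fr S n, p ∈ T) := by
  intro n
  induction n with
  | zero =>
    intro S hnd hin hfuel
    exfalso
    have := pv_len_bound R C S hnd hin
    omega
  | succ n ih =>
    intro S hnd hin hfuel
    by_cases hnil : pvCapturesB board0 R C fr S = []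
    · have hstep : pvIterB board0 R C fr S (n + 1) = S := by
        simp only [pvIterB, hnil, if_true]
      rw [hstep]
      exact ⟨fun p hp => hp, hnd, pv_capturesB_closed board0 R C fr hfr S hnil,
        fun T _ hT p hp => hT p hp⟩
    · have hstep : pvIterB board0 R C fr S (n + 1)
          = pvIterB board0 R C fr (PySem.Set.union S (pvCapturesB board0 R C fr S)) n := by
        simp only [pvIterB, hnil, if_false]
      set nw := pvCapturesB board0 R C fr S with hnw
      have hmemU : ∀ p, p ∈ PySem.Set.union S nw ↔ p ∈ S ∨ p ∈ nw :=
        fun p => PySem.Set.mem_union S nw p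
      have hndU : (PySem.Set.union S nw).Nodup := PySem.Set.nodup_union S nw hnd
      have hinU : ∀ p ∈ PySem.Set.union S nw, pvInBd R C p := by
        intro p hp
        rcases (hmemU p).mp hp with h | h
        · exact hin p h
        · exact (pv_capturesB_props board0 R C fr S p h).1.1
      obtain ⟨p₀, hp₀⟩ := List.exists_mem_of_ne_nil nw hnil
      have hlt : S.length < (PySem.Set.union S nw).length :=
        pv_len_lt S (PySem.Set.union S nw) hnd hndU
          (fun p hp => (hmemU p).mpr (Or.inl hp)) p₀ ((hmemU p₀).mpr (Or.inr hp₀))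
          (pv_capturesB_props board0 R C fr S p₀ hp₀).2
      obtain ⟨hmono, hndF, hclF, hminF⟩ :=
        ih (PySem.Set.union S nw) hndU hinU (by omega)
      rw [hstep]
      refine ⟨fun p hp => hmono p ((hmemU p).mpr (Or.inl hp)), hndF, hclF, ?_⟩
      intro T hcl hT p hp
      refine hminF T hcl ?_ p hp
      intro q hq
      rcases (hmemU q).mp hq with h | h
      · exact hT q h
      · obtain ⟨c, hcS, d, hd, hseg⟩ := (pv_mem_capturesB board0 R C fr S q).mp h
        cases hr : pvRayB board0 S R C d.1 d.2 (c.1 + d.1) (c.2 + d.2) fr with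
        | none => rw [hr] at hseg; simp at hseg
        | some seg =>
          rw [hr] at hseg
          simp only [Option.getD_some] at hseg
          exact pvRay_absorb board0 R C T hcl S hT c d (hT c hcS) (hin c hcS) hd fr seg hr
            q hseg


-- ---- per-placement: the worklist cascade equals B's fixed-point cascade ----

theorem pvCascade_eq (chessboard : List String) (pi pj : Nat)
    (hi : pi < chessboard.length) (hj : pj < (chessboard.headD "").toList.length) :
    pvCascadeB chessboard (chessboard.length : Int) ((chessboard.headD "").toList.length : Int)
      (chessboard.length + (chessboard.headD "").toList.length + 2)
      (chessboard.length * (chessboard.headD "").toList.length + 2) (pi : Int) (pj : Int) =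
    PySem.Set.len (pvIterB chessboard (chessboard.length : Int)
      ((chessboard.headD "").toList.length : Int)
      (chessboard.length + (chessboard.headD "").toList.length + 2)
      (PySem.Set.add PySem.Set.empty ((pi : Int), (pj : Int)))
      (chessboard.length * (chessboard.headD "").toList.length)) - 1 := by
  set R : Int := (chessboard.length : Int) with hR
  set C : Int := ((chessboard.headD "").toList.length : Int) with hC
  set fr : Nat := chessboard.length + (chessboard.headD "").toList.length + 2 with hfrdef
  have hfr : R.toNat + C.toNat + 2 ≤ fr := by
    simp [hR, hC, hfrdef]
  have hseed : PySem.Set.add PySem.Set.empty ((pi : Int), (pj : Int))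
      = [((pi : Int), (pj : Int))] := rfl
  have hseedin : pvInBd R C ((pi : Int), (pj : Int)) := by
    refine ⟨Int.natCast_nonneg pi, ?_, Int.natCast_nonneg pj, ?_⟩
    · show (pi : Int) < R
      rw [hR]; exact_mod_cast hi
    · show (pj : Int) < C
      rw [hC]; exact_mod_cast hj
  have hW : pvWInv R C [((pi : Int), (pj : Int))] [((pi : Int), (pj : Int))] :=
    ⟨fun p => Iff.rfl, List.nodup_singleton _, fun p hp => by
      rcases List.mem_singleton.mp hp with rfl
      exact hseedin⟩
  have hQ : pvPendQ chessboard R C [((pi : Int), (pj : Int))]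
      (([((pi : Int), (pj : Int))]).drop 0) := by
    intro c d k hcp
    exact Or.inl hcp.1
  obtain ⟨flF, orderF, hres, hWF, hmonoF, hclF, hminF⟩ :=
    pvLoop_inv chessboard R C fr hfr
      (chessboard.length * (chessboard.headD "").toList.length + 2)
      [((pi : Int), (pj : Int))] [((pi : Int), (pj : Int))] 0 hW hQ (by simp)
      (by simp [hR, hC])
  obtain ⟨hmonoS, hndS, hclS, hminS⟩ :=
    pvIter_inv chessboard R C fr hfr
      (chessboard.length * (chessboard.headD "").toList.length)
      [((pi : Int), (pj : Int))] (List.nodup_singleton _)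
      (fun p hp => by rcases List.mem_singleton.mp hp with rfl; exact hseedin)
      (by simp [hR, hC])
  set SF := pvIterB chessboard R C fr [((pi : Int), (pj : Int))]
    (chessboard.length * (chessboard.headD "").toList.length) with hSF
  -- the two final sets have the same members
  have hsub1 : ∀ p ∈ flF, p ∈ SF := hminF SF hclS hmonoS
  have hsub2 : ∀ p ∈ SF, p ∈ flF := hminS flF hclF hmonoF
  have hperm : orderF.Perm SF := by
    rw [List.perm_ext_iff_of_nodup hWF.2.1 hndS]
    intro a
    constructor
    · intro h
      exact hsub1 a ((hWF.1 a).mpr h)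
    · intro h
      exact (hWF.1 a).mp (hsub2 a h)
  have hlen : orderF.length = SF.length := hperm.length_eq
  have hcas : pvCascadeB chessboard R C fr
      (chessboard.length * (chessboard.headD "").toList.length + 2) (pi : Int) (pj : Int)
      = (orderF.length : Int) - 1 := by
    unfold pvCascadeB
    rw [hseed]
    exact hres
  rw [hcas, hseed, ← hSF, hlen]
  rfl

-- ===== VERDICT (by name: the statement is the Claim_ definition above) =====
theorem flipChess_spec : Claim_equal_flipChess := by
  intro chessboard hdom hpre
  show flipChess chessboard = flipChess_alt chessboard
  unfold flipChess flipChess_alt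
  simp only [List.length_map, pv_row0_map chessboard]
  refine PySem.List.foldl_congr_mem _ _ _ _ ?_
  intro res i hi
  refine PySem.List.foldl_congr_mem _ _ _ _ ?_
  intro res' j hj
  have hi' : ∃ a : Nat, a < chessboard.length ∧ i = (a : Int) := by
    simpa [List.mem_range] using hi
  have hj' : ∃ b : Nat, b < (chessboard.headD "").toList.length ∧ j = (b : Int) := by
    simpa [List.mem_range] using hj
  obtain ⟨a, ha, rfl⟩ := hi'
  obtain ⟨b, hb, rfl⟩ := hj'
  rw [pvCell_map chessboard]
  rw [pvBfs_eq chessboard hpre a b ha hb, pvCascade_eq chessboard a b ha hb]
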